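-- pv_equiv track=rewrite | github.com/pdange21/Leetcode-Python-Solutions | 1662. Check If Two String Arrays are Equivalent/solution_1.py | arrayStringsAreEqual
-- ===== SOURCE A (Python) =====
-- from typing import List
--
-- def arrayStringsAreEqual(word1: List[str], word2: List[str]) -> bool:
--
--     #naive and brute force approach requires extra O(n) memory
--     string_word1 = string_word2 = ""
--
--     for i in word1:
--         string_word1 += i
--
--     for j in word2:
--         string_word2 += j
--
--     if string_word1 == string_word2:
--         return True
--     return False
-- ===== SOURCE B (Python) =====
-- from typing import List
--
-- def arrayStringsAreEqual(word1: List[str], word2: List[str]) -> bool: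
--     # two-pointer streaming comparison: no concatenated strings are built
--     i1 = i2 = c1 = c2 = 0
--     while True:
--         while i1 < len(word1) and c1 >= len(word1[i1]):
--             i1 += 1
--             c1 = 0
--         while i2 < len(word2) and c2 >= len(word2[i2]):
--             i2 += 1
--             c2 = 0
--         if i1 == len(word1) or i2 == len(word2):
--             return i1 == len(word1) and i2 == len(word2)
--         if word1[i1][c1] != word2[i2][c2]:
--             return False
--         c1 += 1
--         c2 += 1
-- ===== Notes on version B (the rewrite author's own statement) =====
-- stated objective: alternative
-- what changed: Replaces building both concatenated strings and comparing them with a two-pointer streaming comparison (outer index + char index per array, skipping empty strings) that compares one character at a time and stops at the first mismatch, never materialising the concatenations.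
import Mathlib
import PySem

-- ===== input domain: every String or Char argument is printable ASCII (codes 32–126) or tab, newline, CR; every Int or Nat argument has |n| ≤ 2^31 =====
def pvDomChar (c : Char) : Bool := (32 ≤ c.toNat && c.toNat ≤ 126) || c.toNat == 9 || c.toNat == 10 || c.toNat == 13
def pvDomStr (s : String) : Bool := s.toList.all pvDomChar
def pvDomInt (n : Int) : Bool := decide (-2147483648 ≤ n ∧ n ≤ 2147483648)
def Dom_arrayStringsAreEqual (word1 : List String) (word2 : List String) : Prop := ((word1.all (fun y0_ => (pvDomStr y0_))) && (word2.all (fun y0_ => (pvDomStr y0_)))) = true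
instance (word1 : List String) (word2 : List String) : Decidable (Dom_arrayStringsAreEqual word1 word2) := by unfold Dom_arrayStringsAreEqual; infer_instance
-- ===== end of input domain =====

-- B replaces A's build-both-concatenations-and-compare with a two-pointer streaming
-- character comparison that never materialises the concatenated strings (objective: alternative).

-- ===== PORT A =====
-- A: accumulate word1 into one string, word2 into another, compare.
def arrayStringsAreEqual (word1 : List String) (word2 : List String) : Bool :=
  let string_word1 := word1.foldl (fun acc i => acc ++ i) ""
  let string_word2 := word2.foldl (fun acc j => acc ++ j) ""
  if string_word1 == string_word2 then true else false

-- ===== PORT B =====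
-- B's streaming loop on the remaining characters of the current word plus the remaining
-- words of each side (the index pair (i,c) of Source B corresponds to this suffix state);
-- empty current words are skipped, then one character of each side is compared.
def altGo : List (List Char) → List (List Char) → Bool
  | [], [] => true
  | [], [] :: r2 => altGo [] r2
  | [], (_ :: _) :: _ => false
  | [] :: r1, l2 => altGo r1 l2
  | (_ :: _) :: _, [] => false
  | (c :: cs) :: r1, [] :: r2 => altGo ((c :: cs) :: r1) r2
  | (c :: cs) :: r1, (d :: ds) :: r2 => c == d && altGo (cs :: r1) (ds :: r2)
termination_by l1 l2 => l1.length + l2.length + (l1.map List.length).sum + (l2.map List.length).sum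
decreasing_by all_goals (first | (simp; omega) | simp)

def arrayStringsAreEqual_alt (word1 : List String) (word2 : List String) : Bool :=
  altGo (word1.map String.toList) (word2.map String.toList)

-- ===== PRECONDITION & SPEC =====
def Spec_arrayStringsAreEqual (word1 : List String) (word2 : List String) (out : Bool) : Prop := out = arrayStringsAreEqual_alt word1 word2
instance (word1 : List String) (word2 : List String) (out : Bool) : Decidable (Spec_arrayStringsAreEqual word1 word2 out) := by unfold Spec_arrayStringsAreEqual; infer_instance

-- ===== CLAIM (what is proved, stated in full; the proofs are below) =====
def Claim_equal_arrayStringsAreEqual : Prop := ∀ (word1 : List String) (word2 : List String), Dom_arrayStringsAreEqual word1 word2 → Spec_arrayStringsAreEqual word1 word2 (arrayStringsAreEqual word1 word2)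

-- ===== LEMMAS AND PROOFS =====

-- the streaming comparison decides equality of the flattened character sequences
theorem altGo_eq_flatten (l1 l2 : List (List Char)) :
    altGo l1 l2 = decide (l1.flatten = l2.flatten) := by
  fun_induction altGo l1 l2 with
  | case1 => simp
  | case2 r2 ih => simpa using ih
  | case3 => simp
  | case4 r1 l2 ih => simpa using ih
  | case5 => simp
  | case6 c cs r1 r2 ih => simpa using ih
  | case7 c cs r1 d ds r2 ih =>
    rw [ih]
    simp only [List.flatten_cons, List.cons_append, List.cons_eq_cons,
      Bool.beq_eq_decide_eq]
    by_cases hc : c = d <;> by_cases ht : cs ++ r1.flatten = ds ++ r2.flatten <;>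
      simp [hc, ht]

theorem foldl_append_toList (ws : List String) (a : String) :
    (ws.foldl (fun acc i => acc ++ i) a).toList = a.toList ++ (ws.map String.toList).flatten := by
  induction ws generalizing a with
  | nil => simp
  | cons w ws ih => simp [List.foldl_cons, ih]

-- ===== VERDICT (by name: the statement is the Claim_ definition above) =====
theorem arrayStringsAreEqual_spec : Claim_equal_arrayStringsAreEqual := by
  intro word1 word2 _
  unfold Spec_arrayStringsAreEqual arrayStringsAreEqual arrayStringsAreEqual_alt
  rw [altGo_eq_flatten]
  have h1 := foldl_append_toList word1 ""
  have h2 := foldl_append_toList word2 ""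
  simp only [String.toList_empty, List.nil_append] at h1 h2
  by_cases h : (word1.map String.toList).flatten = (word2.map String.toList).flatten
  · have : word1.foldl (fun acc i => acc ++ i) "" = word2.foldl (fun acc j => acc ++ j) "" := by
      apply String.toList_injective; rw [h1, h2, h]
    simp [this, h]
  · have : word1.foldl (fun acc i => acc ++ i) "" ≠ word2.foldl (fun acc j => acc ++ j) "" := by
      intro e; apply h; rw [← h1, ← h2, e]
    simp [this, h]
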